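-- pv_equiv track=rewrite | github.com/kafleprabhakar/DocProcessing | services/util.py | remove_duplicate_lines
-- ===== SOURCE A (Python) =====
-- def remove_duplicate_lines(lines):
--     final_lines = []
--     for line in lines:
--         duplicate = False
--         for final_line in final_lines:
--             if abs(line[0]-final_line[0]) < 10 and abs(line[1]-final_line[1])<10 and abs(line[2]-final_line[2]) < 10 and abs(line[3]-final_line[3])<10:
--                 duplicate = True
--         if not duplicate:
--             final_lines.append(line)
--     return final_lines
-- ===== SOURCE B (Python) =====
-- OFFS = (-1, 0, 1)
--
-- def _near(line, fl):
--     return (abs(line[0] - fl[0]) < 10 and abs(line[1] - fl[1]) < 10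
--             and abs(line[2] - fl[2]) < 10 and abs(line[3] - fl[3]) < 10)
--
-- def remove_duplicate_lines(lines):
--     # 4D spatial grid with bucket size 10: a near line can only live in one of
--     # the 81 neighbouring cells, so only those buckets are searched.
--     grid = {}
--     final_lines = []
--     for line in lines:
--         c = (line[0] // 10, line[1] // 10, line[2] // 10, line[3] // 10)
--         dup = any(_near(line, fl)
--                   for dx in OFFS for dy in OFFS for dz in OFFS for dw in OFFS
--                   for fl in grid.get((c[0] + dx, c[1] + dy, c[2] + dz, c[3] + dw), ()))
--         if not dup:
--             final_lines.append(line)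
--             grid[c] = grid.get(c, []) + [line]
--     return final_lines
-- ===== Notes on version B (the rewrite author's own statement) =====
-- stated objective: alternative
-- what changed: Replaces the scan of all previously kept lines by a 4D spatial hash grid with bucket size 10: each line is compared only against kept lines stored in the 81 neighbouring grid cells.
-- outside the precondition, e.g. on remove_duplicate_lines([[1, 2]]): A returns [[1, 2]], B raises IndexError
import Mathlib
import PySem

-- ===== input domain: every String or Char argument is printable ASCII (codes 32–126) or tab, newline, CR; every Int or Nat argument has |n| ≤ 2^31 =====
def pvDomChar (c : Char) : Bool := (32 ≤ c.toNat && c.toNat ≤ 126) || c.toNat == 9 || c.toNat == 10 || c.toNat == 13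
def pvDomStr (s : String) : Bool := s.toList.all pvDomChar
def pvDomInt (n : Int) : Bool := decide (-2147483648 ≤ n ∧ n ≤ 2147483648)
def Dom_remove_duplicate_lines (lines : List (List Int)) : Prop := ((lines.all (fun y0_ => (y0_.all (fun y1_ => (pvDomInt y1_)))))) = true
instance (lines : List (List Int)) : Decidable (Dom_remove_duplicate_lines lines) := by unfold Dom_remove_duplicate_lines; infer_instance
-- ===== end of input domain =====

-- B replaces A's scan of all kept lines by a 4D hash grid (bucket size 10; only the
-- 81 neighbouring cells are searched); return value proved identical on Pre_.

-- line[i] under Pre_ (every line has ≥ 4 entries); default never reached inside Pre_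
def pvG (l : List Int) (i : Int) : Int := (PySem.List.pyGet? l i).getD 0

-- ===== PORT A =====
def remove_duplicate_lines (lines : List (List Int)) : List (List Int) :=
  lines.foldl (fun final_lines line =>
    let duplicate : Bool := final_lines.foldl (fun dup final_line =>
      if |pvG line 0 - pvG final_line 0| < 10 ∧ |pvG line 1 - pvG final_line 1| < 10 ∧
         |pvG line 2 - pvG final_line 2| < 10 ∧ |pvG line 3 - pvG final_line 3| < 10
      then true else dup) false
    if !duplicate then final_lines ++ [line] else final_lines) []

-- ===== PORT B =====
def pvNear (line fl : List Int) : Bool :=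
  decide (|pvG line 0 - pvG fl 0| < 10 ∧ |pvG line 1 - pvG fl 1| < 10 ∧
          |pvG line 2 - pvG fl 2| < 10 ∧ |pvG line 3 - pvG fl 3| < 10)

def pvCell (l : List Int) : Int × Int × Int × Int :=
  (PySem.Int.floordiv (pvG l 0) 10, PySem.Int.floordiv (pvG l 1) 10,
   PySem.Int.floordiv (pvG l 2) 10, PySem.Int.floordiv (pvG l 3) 10)

def pvOffs : List Int := [-1, 0, 1]

def remove_duplicate_lines_alt (lines : List (List Int)) : List (List Int) :=
  (lines.foldl
    (fun (st : List (List Int) × PySem.Dict (Int × Int × Int × Int) (List (List Int))) line =>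
      let c := pvCell line
      let dup : Bool := pvOffs.any fun dx => pvOffs.any fun dy => pvOffs.any fun dz =>
        pvOffs.any fun dw =>
          (st.2.getD (c.1 + dx, c.2.1 + dy, c.2.2.1 + dz, c.2.2.2 + dw) []).any (pvNear line)
      if !dup then (st.1 ++ [line], st.2.insert c (st.2.getD c [] ++ [line])) else st)
    ([], PySem.Dict.empty)).1

-- ===== PRECONDITION & SPEC =====
-- Pre_ excludes lists containing a line with fewer than 4 coordinates: on those A raises
-- IndexError, except when short-circuit evaluation or an empty kept-list skips the missing
-- index so that A still returns (e.g. [[1, 2]]), while B always raises there.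
def Pre_remove_duplicate_lines (lines : List (List Int)) : Prop :=
  ∀ l ∈ lines, 4 ≤ l.length
instance (lines : List (List Int)) : Decidable (Pre_remove_duplicate_lines lines) := by
  unfold Pre_remove_duplicate_lines; infer_instance
def pvWitness_remove_duplicate_lines : List (List Int) :=
  [[0, 0, 0, 0], [3, 3, 3, 3], [100, 0, 0, 0]]
def Spec_remove_duplicate_lines (lines : List (List Int)) (out : List (List Int)) : Prop := out = remove_duplicate_lines_alt lines
instance (lines : List (List Int)) (out : List (List Int)) : Decidable (Spec_remove_duplicate_lines lines out) := by unfold Spec_remove_duplicate_lines; infer_instance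

-- ===== CLAIM (what is proved, stated in full; the proofs are below) =====
def Claim_equal_remove_duplicate_lines : Prop := ∀ (lines : List (List Int)), Dom_remove_duplicate_lines lines → Pre_remove_duplicate_lines lines → Spec_remove_duplicate_lines lines (remove_duplicate_lines lines)

-- ===== LEMMAS AND PROOFS =====

-- A's inner loop ("set the flag, keep scanning") is List.any
theorem foldl_flag_eq_any {α : Type} (p : α → Bool) (l : List α) (b : Bool) :
    l.foldl (fun d x => if p x then true else d) b = (b || l.any p) := by
  induction l generalizing b with
  | nil => simp
  | cons x xs ih =>
    simp only [List.foldl_cons, List.any_cons, ih]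
    cases p x <;> simp

-- lines within 10 land in the same or an adjacent grid cell
theorem cell_adjacent (a b : Int) (h : |a - b| < 10) :
    PySem.Int.floordiv b 10 - PySem.Int.floordiv a 10 ∈ pvOffs := by
  rw [abs_lt] at h
  rw [PySem.Int.floordiv_eq_ediv_of_pos (a := a) (by omega),
      PySem.Int.floordiv_eq_ediv_of_pos (a := b) (by omega)]
  simp only [pvOffs, List.mem_cons, List.not_mem_nil, or_false]
  omega

-- grid invariant: buckets hold exactly the kept lines, keyed by their cell
def pvInv (final : List (List Int))
    (grid : PySem.Dict (Int × Int × Int × Int) (List (List Int))) : Prop :=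
  ∀ fl k, fl ∈ grid.getD k [] ↔ (fl ∈ final ∧ pvCell fl = k)

theorem inv_empty : pvInv [] PySem.Dict.empty := by
  intro fl k; simp [PySem.Dict.getD_empty]

-- under the invariant, B's 81-cell query finds a near kept line iff one exists
theorem dup_eq (line : List Int) (final : List (List Int))
    (grid : PySem.Dict (Int × Int × Int × Int) (List (List Int))) (hinv : pvInv final grid) :
    (pvOffs.any fun dx => pvOffs.any fun dy => pvOffs.any fun dz => pvOffs.any fun dw =>
      (grid.getD ((pvCell line).1 + dx, (pvCell line).2.1 + dy,
                  (pvCell line).2.2.1 + dz, (pvCell line).2.2.2 + dw) []).any (pvNear line))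
    = final.any (pvNear line) := by
  rw [Bool.eq_iff_iff]
  simp only [List.any_eq_true]
  constructor
  · rintro ⟨dx, _, dy, _, dz, _, dw, _, fl, hfl, hnear⟩
    exact ⟨fl, ((hinv fl _).mp hfl).1, hnear⟩
  · rintro ⟨fl, hfl, hnear⟩
    have hn := of_decide_eq_true hnear
    refine ⟨(pvCell fl).1 - (pvCell line).1, cell_adjacent _ _ hn.1,
            (pvCell fl).2.1 - (pvCell line).2.1, cell_adjacent _ _ hn.2.1,
            (pvCell fl).2.2.1 - (pvCell line).2.2.1, cell_adjacent _ _ hn.2.2.1,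
            (pvCell fl).2.2.2 - (pvCell line).2.2.2, cell_adjacent _ _ hn.2.2.2,
            fl, ?_, hnear⟩
    have : ((pvCell line).1 + ((pvCell fl).1 - (pvCell line).1),
            (pvCell line).2.1 + ((pvCell fl).2.1 - (pvCell line).2.1),
            (pvCell line).2.2.1 + ((pvCell fl).2.2.1 - (pvCell line).2.2.1),
            (pvCell line).2.2.2 + ((pvCell fl).2.2.2 - (pvCell line).2.2.2)) = pvCell fl := by
      simp only [Prod.ext_iff]; omega
    rw [this]
    exact (hinv fl (pvCell fl)).mpr ⟨hfl, rfl⟩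

theorem inv_insert (line : List Int) (final : List (List Int))
    (grid : PySem.Dict (Int × Int × Int × Int) (List (List Int))) (hinv : pvInv final grid) :
    pvInv (final ++ [line]) (grid.insert (pvCell line) (grid.getD (pvCell line) [] ++ [line])) := by
  intro fl k
  rw [PySem.Dict.getD_insert]
  split_ifs with hk
  · subst hk
    simp only [List.mem_append, List.mem_singleton, hinv fl (pvCell line)]
    constructor
    · rintro (⟨h1, h2⟩ | rfl)
      · exact ⟨Or.inl h1, h2⟩
      · exact ⟨Or.inr rfl, rfl⟩
    · rintro ⟨h1 | rfl, h2⟩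
      · exact Or.inl ⟨h1, h2⟩
      · exact Or.inr rfl
  · simp only [List.mem_append, List.mem_singleton, hinv fl k]
    constructor
    · rintro ⟨h1, h2⟩
      exact ⟨Or.inl h1, h2⟩
    · rintro ⟨h1 | rfl, h2⟩
      · exact ⟨h1, h2⟩
      · exact absurd h2.symm hk

-- main loop correspondence
theorem loop_eq (lines : List (List Int)) (final : List (List Int))
    (grid : PySem.Dict (Int × Int × Int × Int) (List (List Int))) (hinv : pvInv final grid) :
    lines.foldl (fun final_lines line =>
      let duplicate : Bool := final_lines.foldl (fun dup final_line =>
        if |pvG line 0 - pvG final_line 0| < 10 ∧ |pvG line 1 - pvG final_line 1| < 10 ∧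
           |pvG line 2 - pvG final_line 2| < 10 ∧ |pvG line 3 - pvG final_line 3| < 10
        then true else dup) false
      if !duplicate then final_lines ++ [line] else final_lines) final
    = (lines.foldl
        (fun (st : List (List Int) × PySem.Dict (Int × Int × Int × Int) (List (List Int))) line =>
          let c := pvCell line
          let dup : Bool := pvOffs.any fun dx => pvOffs.any fun dy => pvOffs.any fun dz =>
            pvOffs.any fun dw =>
              (st.2.getD (c.1 + dx, c.2.1 + dy, c.2.2.1 + dz, c.2.2.2 + dw) []).any (pvNear line)
          if !dup then (st.1 ++ [line], st.2.insert c (st.2.getD c [] ++ [line])) else st)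
        (final, grid)).1 := by
  induction lines generalizing final grid with
  | nil => simp
  | cons line rest ih =>
    simp only [List.foldl_cons]
    have hA : (final.foldl (fun dup final_line =>
        if |pvG line 0 - pvG final_line 0| < 10 ∧ |pvG line 1 - pvG final_line 1| < 10 ∧
           |pvG line 2 - pvG final_line 2| < 10 ∧ |pvG line 3 - pvG final_line 3| < 10
        then true else dup) false) = final.any (pvNear line) := by
      have hfun : (fun (dup : Bool) (final_line : List Int) =>
          if |pvG line 0 - pvG final_line 0| < 10 ∧ |pvG line 1 - pvG final_line 1| < 10 ∧
             |pvG line 2 - pvG final_line 2| < 10 ∧ |pvG line 3 - pvG final_line 3| < 10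
          then true else dup)
          = (fun (dup : Bool) (x : List Int) => if pvNear line x then true else dup) := by
        funext dup x
        unfold pvNear
        by_cases h : |pvG line 0 - pvG x 0| < 10 ∧ |pvG line 1 - pvG x 1| < 10 ∧
             |pvG line 2 - pvG x 2| < 10 ∧ |pvG line 3 - pvG x 3| < 10
        · simp [h]
        · simp [h]
      rw [hfun, foldl_flag_eq_any, Bool.false_or]
    have hB := dup_eq line final grid hinv
    simp only [hA, hB]
    by_cases hd : final.any (pvNear line) = true
    · simp only [hd, Bool.not_true, Bool.false_eq_true, if_false]
      exact ih final grid hinv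
    · simp only [Bool.not_eq_true] at hd
      simp only [hd, Bool.not_false, if_true]
      exact ih (final ++ [line]) _ (inv_insert line final grid hinv)

-- ===== VERDICT (by name: the statement is the Claim_ definition above) =====
theorem remove_duplicate_lines_spec : Claim_equal_remove_duplicate_lines := by
  intro lines _ _
  unfold Spec_remove_duplicate_lines remove_duplicate_lines remove_duplicate_lines_alt
  exact loop_eq lines [] PySem.Dict.empty inv_empty
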